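-- pv_equiv track=rewrite | github.com/sabbatinif/GridEx | ITER.py | __checkLimits
-- ===== SOURCE A (Python) =====
-- def __checkLimits(limits, cube, feature):
--     res = None
--     for (c, f, s) in limits:
--         if (cube == c) & (feature == f):
--             if res == None:
--                 res = s
--             else:
--                 return "*"
--     return res
-- ===== SOURCE B (Python) =====
-- def __checkLimits(limits, cube, feature):
--     # Build an index over every (cube, feature) key seen; a repeated key collapses to "*".
--     index = {}
--     for (c, f, s) in limits:
--         key = (c, f)
--         if key in index:
--             index[key] = "*"
--         else:
--             index[key] = s
--     return index.get((cube, feature))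
-- ===== Notes on version B (the rewrite author's own statement) =====
-- stated objective: alternative
-- what changed: Instead of scanning for entries matching the queried (cube, feature), B builds a dict index over ALL (c, f) keys in one pass (collapsing duplicate keys to '*') and then answers by a single dict lookup; A's per-query match test disappears entirely.
import Mathlib
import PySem

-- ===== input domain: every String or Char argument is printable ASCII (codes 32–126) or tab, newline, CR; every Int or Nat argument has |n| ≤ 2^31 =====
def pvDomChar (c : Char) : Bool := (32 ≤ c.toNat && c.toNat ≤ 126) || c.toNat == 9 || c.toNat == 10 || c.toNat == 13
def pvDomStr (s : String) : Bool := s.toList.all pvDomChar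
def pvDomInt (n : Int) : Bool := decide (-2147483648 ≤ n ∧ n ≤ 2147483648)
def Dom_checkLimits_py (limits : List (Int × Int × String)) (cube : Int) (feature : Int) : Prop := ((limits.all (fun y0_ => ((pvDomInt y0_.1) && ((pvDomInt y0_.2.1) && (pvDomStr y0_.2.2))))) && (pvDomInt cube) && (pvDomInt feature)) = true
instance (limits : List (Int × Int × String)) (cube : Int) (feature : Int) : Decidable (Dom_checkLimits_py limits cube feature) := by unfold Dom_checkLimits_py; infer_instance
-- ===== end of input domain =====

-- ===== PORT A =====
-- A: inline state machine — remember the first matching slice, return "*" on a second match.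
def checkLimitsLoop (cube : Int) (feature : Int) : List (Int × Int × String) → Option String → Option String
  | [], res => res
  | (c, f, s) :: rest, res =>
    if (cube == c) && (feature == f) then
      if res == none then checkLimitsLoop cube feature rest (some s)
      else some "*"
    else checkLimitsLoop cube feature rest res

def checkLimits_py (limits : List (Int × Int × String)) (cube : Int) (feature : Int) : Option String :=
  checkLimitsLoop cube feature limits none

-- ===== PORT B =====
-- B: build a dict index over ALL (c, f) keys (a repeated key collapses to "*"), then one lookup.
def checkLimits_py_alt (limits : List (Int × Int × String)) (cube : Int) (feature : Int) : Option String :=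
  let index : PySem.Dict (Int × Int) String :=
    limits.foldl (fun d t =>
      let key := (t.1, t.2.1)
      if d.contains key then d.insert key "*" else d.insert key t.2.2)
      PySem.Dict.empty
  index.get? (cube, feature)

-- ===== PRECONDITION & SPEC =====
def Spec_checkLimits_py (limits : List (Int × Int × String)) (cube : Int) (feature : Int) (out : Option String) : Prop := out = checkLimits_py_alt limits cube feature
instance (limits : List (Int × Int × String)) (cube : Int) (feature : Int) (out : Option String) : Decidable (Spec_checkLimits_py limits cube feature out) := by unfold Spec_checkLimits_py; infer_instance

-- ===== CLAIM (what is proved, stated in full; the proofs are below) =====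
def Claim_equal_checkLimits_py : Prop := ∀ (limits : List (Int × Int × String)) (cube : Int) (feature : Int), Dom_checkLimits_py limits cube feature → Spec_checkLimits_py limits cube feature (checkLimits_py limits cube feature)

-- ===== LEMMAS AND PROOFS =====

-- Matching slices of `l` for the key k, in order.
def pvMatches (k : Int × Int) (l : List (Int × Int × String)) : List String :=
  (l.filter (fun t => (t.1, t.2.1) == k)).map (fun t => t.2.2)

-- (c, f) == (cube, feature) as a pair is A's conjunction of comparisons.
theorem pvPairBeq (t : Int × Int × String) (cube feature : Int) :
    ((t.1, t.2.1) == ((cube, feature) : Int × Int)) = ((cube == t.1) && (feature == t.2.1)) := by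
  obtain ⟨a, b, s⟩ := t
  show (a == cube && b == feature) = (cube == a && feature == b)
  rw [Bool.beq_comm (a := a), Bool.beq_comm (a := b)]

-- A's loop started with res = none / some r, characterised by the match list.
theorem checkLimitsLoop_char (cube feature : Int) (limits : List (Int × Int × String)) :
    checkLimitsLoop cube feature limits none =
      (match pvMatches (cube, feature) limits with
       | [] => none
       | [s] => some s
       | _ => some "*") ∧
    ∀ r : String, checkLimitsLoop cube feature limits (some r) =
      (match pvMatches (cube, feature) limits with
       | [] => some r
       | _ => some "*") := by
  induction limits with
  | nil => exact ⟨rfl, fun r => rfl⟩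
  | cons hd tl ih =>
    obtain ⟨ih1, ih2⟩ := ih
    obtain ⟨c, f, s⟩ := hd
    have hm : pvMatches (cube, feature) ((c, f, s) :: tl) =
        if (cube == c) && (feature == f) then s :: pvMatches (cube, feature) tl
        else pvMatches (cube, feature) tl := by
      simp only [pvMatches, List.filter, pvPairBeq (c, f, s) cube feature]
      by_cases h : ((cube == c) && (feature == f)) = true <;> simp [h]
    constructor
    · simp only [checkLimitsLoop, hm]
      by_cases h : ((cube == c) && (feature == f)) = true
      · simp only [h, if_true, ih2 s]
        cases hpm : pvMatches (cube, feature) tl <;> simp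
      · simp only [h, if_false, Bool.false_eq_true, ih1]
    · intro r
      simp only [checkLimitsLoop, hm]
      by_cases h : ((cube == c) && (feature == f)) = true
      · simp [h]
      · simp only [h, if_false, Bool.false_eq_true, ih2 r]

-- B's index fold, characterised at one key relative to an arbitrary starting dict.
theorem buildIdx_get? (k : Int × Int) (l : List (Int × Int × String)) (d : PySem.Dict (Int × Int) String) :
    (l.foldl (fun d t =>
        if d.contains (t.1, t.2.1) then d.insert (t.1, t.2.1) "*" else d.insert (t.1, t.2.1) t.2.2) d).get? k =
      (match pvMatches k l with
       | [] => d.get? k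
       | [s] => if d.contains k then some "*" else some s
       | _ => some "*") := by
  induction l generalizing d with
  | nil => rfl
  | cons hd tl ih =>
    obtain ⟨c, f, s⟩ := hd
    simp only [List.foldl]
    rw [ih]
    have hm : pvMatches k ((c, f, s) :: tl) =
        if ((c, f) : Int × Int) == k then s :: pvMatches k tl else pvMatches k tl := by
      simp only [pvMatches, List.filter]
      by_cases h : (((c, f) : Int × Int) == k) = true <;> simp [h]
    by_cases hk : ((c, f) : Int × Int) = k
    · subst hk
      simp only [hm, beq_self_eq_true, if_true]
      by_cases hc : d.contains (c, f) = true <;>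
        · simp only [hc, if_true, if_false, Bool.false_eq_true,
            PySem.Dict.get?_insert_self, PySem.Dict.contains_insert_self]
          cases hpm : pvMatches (c, f) tl with
          | nil => simp
          | cons a tl' => cases tl' <;> simp
    · have hne : (((c, f) : Int × Int) == k) = false := by
        simp [hk]
      have hg : ∀ v, (d.insert (c, f) v).get? k = d.get? k :=
        fun v => PySem.Dict.get?_insert_of_ne d v (fun h => hk h.symm)
      have hcon : ∀ v, (d.insert (c, f) v).contains k = d.contains k := by
        intro v
        rw [PySem.Dict.contains_insert]
        simp [Ne.symm hk]
      simp only [hm, hne, Bool.false_eq_true, if_false]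
      by_cases hc : d.contains (c, f) = true <;> simp only [hc, if_true, if_false, Bool.false_eq_true, hg, hcon]

-- ===== VERDICT (by name: the statement is the Claim_ definition above) =====
theorem checkLimits_py_spec : Claim_equal_checkLimits_py := by
  intro limits cube feature _
  unfold Spec_checkLimits_py checkLimits_py checkLimits_py_alt
  rw [(checkLimitsLoop_char cube feature limits).1, buildIdx_get? (cube, feature) limits PySem.Dict.empty]
  cases hm : pvMatches (cube, feature) limits with
  | nil => simp
  | cons a tl => cases tl <;> simp
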